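-- pv_equiv track=rewrite | github.com/leirons/Game-Test | tests/models/indicator.py | combo_merged_houses
-- ===== SOURCE A (Python) =====
-- def combo_merged_houses(houses):
--     previous = houses[0]
--     sum_ = 0
--     for i in range(1, len(houses)):
--         count = houses[i].get('count')
--         lvl = houses[i].get('lvl')
--         sum_first = lvl * count
--         sum_second = previous.get('count') * previous.get('lvl')
--         res = sum_first + sum_second
--         sum_ = sum_ + res
--         previous = houses[i]
--     return sum_ * 2
-- ===== SOURCE B (Python) =====
-- def combo_merged_houses(houses):
--     first = houses[0]
--     if len(houses) == 1:
--         return 0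
--     total = sum(h['count'] * h['lvl'] for h in houses)
--     last = houses[-1]
--     return 2 * (2 * total - first['count'] * first['lvl'] - last['count'] * last['lvl'])
-- ===== Notes on version B (the rewrite author's own statement) =====
-- stated objective: simpler
-- what changed: Replaces the pairwise previous-tracking loop by one whole-list sum of count*lvl plus an endpoint correction from the telescoping identity: result = 2*(2*total - first - last); a singleton has no pairs and returns 0 directly.
import Mathlib
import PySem

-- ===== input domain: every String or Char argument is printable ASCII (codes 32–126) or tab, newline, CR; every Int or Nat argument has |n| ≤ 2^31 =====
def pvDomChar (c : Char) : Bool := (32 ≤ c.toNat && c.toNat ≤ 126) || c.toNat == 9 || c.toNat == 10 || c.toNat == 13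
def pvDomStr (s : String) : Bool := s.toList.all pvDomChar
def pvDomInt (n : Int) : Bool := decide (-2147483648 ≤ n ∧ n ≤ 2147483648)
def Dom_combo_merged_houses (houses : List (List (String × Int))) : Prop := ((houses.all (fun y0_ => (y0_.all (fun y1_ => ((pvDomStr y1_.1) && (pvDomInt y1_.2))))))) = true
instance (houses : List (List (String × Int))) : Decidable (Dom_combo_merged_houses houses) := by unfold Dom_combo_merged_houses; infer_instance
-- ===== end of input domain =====

-- B replaces A's pairwise previous-tracking loop by one whole-list sum plus an
-- endpoint correction (telescoping identity); objective: simpler, same O(n) cost.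


-- ===== PORT A =====
-- previous = houses[0]; for i in range(1, len(houses)): sum_ += houses[i] product + previous product
-- houses[0] raises IndexError on []: excluded by Pre_ (port returns 0 there);
-- .get returning None (missing key) raises TypeError on '*': excluded by Pre_ (port defaults to 0).
def combo_merged_houses (houses : List (List (String × Int))) : Int :=
  match PySem.List.pyGet? houses 0 with
  | none => 0
  | some previous0 =>
    let st := (PySem.List.pyRange 1 (PySem.List.len houses) 1).foldl
      (fun (s : (List (String × Int)) × Int) i =>
        let hi := PySem.List.pyGetD houses i []
        let count := PySem.Dict.getD (PySem.Dict.mk hi) "count" 0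
        let lvl := PySem.Dict.getD (PySem.Dict.mk hi) "lvl" 0
        let sum_first := lvl * count
        let sum_second := (PySem.Dict.getD (PySem.Dict.mk s.1) "count" 0) * (PySem.Dict.getD (PySem.Dict.mk s.1) "lvl" 0)
        let res := sum_first + sum_second
        (hi, s.2 + res)) (previous0, 0)
    st.2 * 2

-- ===== PORT B =====
-- h['count']*h['lvl'] for one dict; a missing key raises KeyError in Python: excluded by Pre_
-- (port defaults to 0).
def pvVal (d : List (String × Int)) : Int :=
  PySem.Dict.getD (PySem.Dict.mk d) "count" 0 * PySem.Dict.getD (PySem.Dict.mk d) "lvl" 0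

-- first = houses[0] (IndexError on [], excluded by Pre_; port returns 0 there);
-- singleton → 0; else total = sum of count*lvl, answer = 2*(2*total - first - last).
def combo_merged_houses_alt (houses : List (List (String × Int))) : Int :=
  match PySem.List.pyGet? houses 0 with
  | none => 0
  | some first =>
    if PySem.List.len houses = 1 then 0
    else
      let total := (houses.map pvVal).sum
      let last := (PySem.List.pyGet? houses (-1)).getD []
      2 * (2 * total - pvVal first - pvVal last)

-- ===== PRECONDITION & SPEC =====
-- Pre_ excludes exactly the inputs where Python A raises (B raises on the same inputs): the
-- empty list (IndexError on houses[0]) and, when the loop runs (two or more houses), any dict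
-- missing the 'count' or 'lvl' key (.get gives None, '*' raises TypeError); a singleton list
-- is admitted regardless since the loop body never runs.
def Pre_combo_merged_houses (houses : List (List (String × Int))) : Prop :=
  houses ≠ [] ∧ (houses.length = 1 ∨ ∀ d ∈ houses,
    (PySem.Dict.get? (PySem.Dict.mk d) "count").isSome ∧ (PySem.Dict.get? (PySem.Dict.mk d) "lvl").isSome)
instance (houses : List (List (String × Int))) : Decidable (Pre_combo_merged_houses houses) := by unfold Pre_combo_merged_houses; infer_instance
def pvWitness_combo_merged_houses : (List (List (String × Int))) :=
  [[("count", 2), ("lvl", 3)], [("count", 1), ("lvl", 5)]]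
def Spec_combo_merged_houses (houses : List (List (String × Int))) (out : Int) : Prop := out = combo_merged_houses_alt houses
instance (houses : List (List (String × Int))) (out : Int) : Decidable (Spec_combo_merged_houses houses out) := by unfold Spec_combo_merged_houses; infer_instance

-- ===== CLAIM (what is proved, stated in full; the proofs are below) =====
def Claim_equal_combo_merged_houses : Prop := ∀ (houses : List (List (String × Int))), Dom_combo_merged_houses houses → Pre_combo_merged_houses houses → Spec_combo_merged_houses houses (combo_merged_houses houses)

-- ===== LEMMAS AND PROOFS =====

-- The loop invariant: folding A's step over a tail t with previous p and accumulator acc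
-- yields acc + v p + 2*Σ v t - v (last of p::t).
theorem pvLoop (t : List (List (String × Int))) (p : List (String × Int)) (acc : Int) :
    (t.foldl (fun (s : (List (String × Int)) × Int) hi =>
        (hi, s.2 + (PySem.Dict.getD (PySem.Dict.mk hi) "lvl" 0 * PySem.Dict.getD (PySem.Dict.mk hi) "count" 0
          + PySem.Dict.getD (PySem.Dict.mk s.1) "count" 0 * PySem.Dict.getD (PySem.Dict.mk s.1) "lvl" 0))) (p, acc)).2
      = acc + pvVal p + 2 * (t.map pvVal).sum - pvVal (t.getLastD p) := by
  induction t generalizing p acc with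
  | nil => simp [pvVal]
  | cons x t' ih =>
    simp only [List.foldl_cons, List.map_cons, List.sum_cons, List.getLastD_cons]
    rw [ih]
    simp [pvVal]; ring

theorem pvGetLast? {α : Type} (h : α) (t : List α) : (h :: t).getLast? = some (t.getLastD h) := by
  induction t generalizing h with
  | nil => rfl
  | cons y t' ih => rw [List.getLast?_cons_cons, ih, List.getLastD_cons]

theorem combo_eq (houses : List (List (String × Int))) :
    combo_merged_houses houses = combo_merged_houses_alt houses := by
  cases houses with
  | nil => decide
  | cons h t =>
    unfold combo_merged_houses combo_merged_houses_alt
    rw [PySem.List.pyGet?_zero_cons, PySem.List.pyGet?_neg_one]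
    have hfold := PySem.List.foldl_pyRange_pyGetD (xs := h :: t) (a := 1) (d := [])
      (f := fun (s : (List (String × Int)) × Int) hi =>
        (hi, s.2 + (PySem.Dict.getD (PySem.Dict.mk hi) "lvl" 0 * PySem.Dict.getD (PySem.Dict.mk hi) "count" 0
          + PySem.Dict.getD (PySem.Dict.mk s.1) "count" 0 * PySem.Dict.getD (PySem.Dict.mk s.1) "lvl" 0)))
      (init := (h, 0)) (by norm_num)
    simp only [] at hfold ⊢
    rw [hfold, pvLoop]
    rw [pvGetLast? h t]
    cases t with
    | nil => simp [PySem.List.len, pvVal]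
    | cons y t' =>
      have hlen : PySem.List.len (h :: y :: t') ≠ 1 := by
        simp [PySem.List.len]; omega
      rw [if_neg hlen]
      simp [pvVal]; ring

-- ===== VERDICT (by name: the statement is the Claim_ definition above) =====
theorem combo_merged_houses_spec : Claim_equal_combo_merged_houses := by
  intro houses _ _
  unfold Spec_combo_merged_houses
  exact (combo_eq houses)
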